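-- pv_equiv track=rewrite | github.com/E-Aho/AdventOfCode2019 | 03/ScriptDay3.py | get_stepped_maps
-- ===== SOURCE A (Python) =====
-- def add_segment(start_pos, vector):
--     return start_pos[0] + vector[0], start_pos[1] + vector[1]
--
-- def get_stepped_maps(instructions):
--     maps = []
--     for w in instructions:
--         start = (0, 0)
--         stepped_map = []
--         tot_length = 0  # length to start of segment
--         for segment_direction in w:
--             end = add_segment(start, segment_direction)
--             stepped_map.append((start, end, tot_length))
--             tot_length += (abs(segment_direction[0]) + abs(segment_direction[1]))
--             start = end
--         maps.append(stepped_map)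
--     return maps
-- ===== SOURCE B (Python) =====
-- def get_stepped_maps(instructions):
--     maps = []
--     for w in instructions:
--         # pass 1: vertex list by prefix-accumulating the direction vectors
--         points = [(0, 0)]
--         for dx, dy in w:
--             px, py = points[-1]
--             points.append((px + dx, py + dy))
--         # pass 2: prefix sums of segment lengths, with leading 0
--         length_prefix = [0]
--         for dx, dy in w:
--             length_prefix.append(length_prefix[-1] + abs(dx) + abs(dy))
--         # pair consecutive vertices with the length prefix
--         maps.append([(points[i], points[i + 1], length_prefix[i])
--                      for i in range(len(w))])
--     return maps
-- ===== Notes on version B (the rewrite author's own statement) =====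
-- stated objective: alternative
-- what changed: Replaces A's single fused loop carrying (start, tot_length) state by two separate prefix-scan passes (vertex list and length-prefix list) that are then zipped by index into the segment tuples.
import Mathlib
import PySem

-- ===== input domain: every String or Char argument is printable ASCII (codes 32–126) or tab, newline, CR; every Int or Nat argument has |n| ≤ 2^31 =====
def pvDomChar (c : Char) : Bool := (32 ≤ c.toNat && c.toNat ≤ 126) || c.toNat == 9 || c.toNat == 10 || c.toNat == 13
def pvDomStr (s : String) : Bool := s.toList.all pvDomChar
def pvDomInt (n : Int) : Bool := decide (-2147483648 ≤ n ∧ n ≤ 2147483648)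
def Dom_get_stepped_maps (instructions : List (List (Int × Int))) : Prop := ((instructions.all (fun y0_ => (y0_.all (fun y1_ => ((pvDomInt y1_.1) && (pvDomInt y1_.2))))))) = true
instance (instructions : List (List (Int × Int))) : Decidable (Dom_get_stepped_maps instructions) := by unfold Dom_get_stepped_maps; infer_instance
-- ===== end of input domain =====

-- B replaces A's single fused loop carrying (start, tot_length) state by two separate
-- prefix-scan passes (vertices, length prefixes) zipped by index; alternative decomposition, same cost.


-- ===== PORT A =====
def add_segment (start_pos : Int × Int) (vector : Int × Int) : Int × Int :=
  (start_pos.1 + vector.1, start_pos.2 + vector.2)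

-- inner loop of A: state (start, stepped_map, tot_length)
def stepA (w : List (Int × Int)) (st : (Int × Int) × List ((Int × Int) × (Int × Int) × Int) × Int) :
    (Int × Int) × List ((Int × Int) × (Int × Int) × Int) × Int :=
  w.foldl (fun st d =>
    let e := add_segment st.1 d
    (e, st.2.1 ++ [(st.1, e, st.2.2)], st.2.2 + (|d.1| + |d.2|))) st

def get_stepped_maps (instructions : List (List (Int × Int))) : List (List ((Int × Int) × (Int × Int) × Int)) :=
  instructions.foldl (fun maps w => maps ++ [(stepA w ((0, 0), [], 0)).2.1]) []

-- ===== PORT B =====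
def wireB (w : List (Int × Int)) : List ((Int × Int) × (Int × Int) × Int) :=
  let points := w.scanl (fun p v => (p.1 + v.1, p.2 + v.2)) (0, 0)
  let lens := w.scanl (fun t v => t + (|v.1| + |v.2|)) 0
  ((points.zip points.tail).zip lens).map (fun x => (x.1.1, x.1.2, x.2))

def get_stepped_maps_alt (instructions : List (List (Int × Int))) : List (List ((Int × Int) × (Int × Int) × Int)) :=
  instructions.map wireB

-- ===== PRECONDITION & SPEC =====
def Spec_get_stepped_maps (instructions : List (List (Int × Int))) (out : List (List ((Int × Int) × (Int × Int) × Int))) : Prop := out = get_stepped_maps_alt instructions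
instance (instructions : List (List (Int × Int))) (out : List (List ((Int × Int) × (Int × Int) × Int))) : Decidable (Spec_get_stepped_maps instructions out) := by unfold Spec_get_stepped_maps; infer_instance

-- ===== CLAIM (what is proved, stated in full; the proofs are below) =====
def Claim_equal_get_stepped_maps : Prop := ∀ (instructions : List (List (Int × Int))), Dom_get_stepped_maps instructions → Spec_get_stepped_maps instructions (get_stepped_maps instructions)

-- ===== LEMMAS AND PROOFS =====

-- generalized inner-loop equivalence: A's fused fold from any state equals the
-- accumulator followed by B's zipped scans started at that state.
theorem wire_eq (w : List (Int × Int)) :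
    ∀ (start : Int × Int) (acc : List ((Int × Int) × (Int × Int) × Int)) (tot : Int),
      (stepA w (start, acc, tot)).2.1 =
        acc ++ (((w.scanl (fun p v => (p.1 + v.1, p.2 + v.2)) start).zip
                  (w.scanl (fun p v => (p.1 + v.1, p.2 + v.2)) start).tail).zip
                  (w.scanl (fun t v => t + (|v.1| + |v.2|)) tot)).map
                (fun x => (x.1.1, x.1.2, x.2)) := by
  induction w with
  | nil => intro start acc tot; simp [stepA]
  | cons d w ih =>
    intro start acc tot
    simp only [stepA, List.foldl_cons] at *
    rw [ih]
    cases w with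
    | nil => simp [add_segment, List.scanl]
    | cons d' w' => simp [add_segment, List.scanl_cons, List.append_assoc]

theorem get_stepped_maps_eq (instructions : List (List (Int × Int))) :
    get_stepped_maps instructions = get_stepped_maps_alt instructions := by
  have h : ∀ (ws : List (List (Int × Int))) (acc : List (List ((Int × Int) × (Int × Int) × Int))),
      ws.foldl (fun maps w => maps ++ [(stepA w ((0, 0), [], 0)).2.1]) acc = acc ++ ws.map wireB := by
    intro ws
    induction ws with
    | nil => intro acc; simp
    | cons w ws ih =>
      intro acc
      simp only [List.foldl_cons, List.map_cons, ih]
      rw [wire_eq]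
      simp [wireB]
  simpa [get_stepped_maps, get_stepped_maps_alt] using h instructions []

-- ===== VERDICT (by name: the statement is the Claim_ definition above) =====
theorem get_stepped_maps_spec : Claim_equal_get_stepped_maps := by
  intro instructions _
  unfold Spec_get_stepped_maps
  exact get_stepped_maps_eq instructions
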